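-- pv_equiv track=rewrite | github.com/BullsEye-ABM/prospector-app | app.py | parse_prospects
-- ===== SOURCE A (Python) =====
-- def parse_prospects(prospects: list) -> list:
--     """Convierte los prospects de Evaboot al formato interno.
--     Evaboot devuelve campos con Mayúsculas y espacios: 'First Name', 'Current Job', etc."""
--     contacts = []
--     for p in prospects:
--         # Evaboot API devuelve: "First Name", "Last Name", "Current Job",
--         # "Company Name", "Company Domain", "Email", "Phone", "Location"
--         fn  = (p.get("First Name")  or p.get("first_name")  or p.get("firstName")  or "")
--         ln  = (p.get("Last Name")   or p.get("last_name")   or p.get("lastName")   or "")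
--         full = (p.get("Full Name")  or p.get("full_name")   or p.get("fullName")
--                 or p.get("name")    or f"{fn} {ln}".strip())
--         c = {
--             "first_name"  : fn,
--             "last_name"   : ln,
--             "full_name"   : full,
--             "job_title"   : (p.get("Current Job") or p.get("job_title")
--                              or p.get("headline") or p.get("title")
--                              or p.get("current_title") or ""),
--             "company_name": (p.get("Company Name") or p.get("company_name")
--                              or p.get("company") or p.get("current_company") or ""),
--             "domain"      : (p.get("Company Domain") or p.get("company_domain")
--                              or p.get("domain") or p.get("company_website") or ""),
--             "linkedin_url": (p.get("LinkedIn URL") or p.get("linkedin_url")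
--                              or p.get("linkedin_profile_url") or p.get("profileUrl") or ""),
--             "country"     : (p.get("Location") or p.get("country") or p.get("location") or ""),
--             "email"       : (p.get("Email") or p.get("email") or p.get("found_email") or None),
--             "phone"       : (p.get("Phone") or p.get("phone") or p.get("phone_number") or None),
--         }
--         if c["full_name"] or c["job_title"]:
--             contacts.append(c)
--     return contacts
-- ===== SOURCE B (Python) =====
-- # B: instead of probing each output field through an or-chain of p.get calls,
-- # build a reverse index source-key -> (field, rank) once, scan each prospect's
-- # items in a single pass keeping per field the truthy value of minimal rank,
-- # then fill defaults, patch full_name and filter.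
--
-- _SOURCES = {
--     "First Name": ("first_name", 0), "first_name": ("first_name", 1), "firstName": ("first_name", 2),
--     "Last Name": ("last_name", 0), "last_name": ("last_name", 1), "lastName": ("last_name", 2),
--     "Full Name": ("full_name", 0), "full_name": ("full_name", 1), "fullName": ("full_name", 2), "name": ("full_name", 3),
--     "Current Job": ("job_title", 0), "job_title": ("job_title", 1), "headline": ("job_title", 2),
--     "title": ("job_title", 3), "current_title": ("job_title", 4),
--     "Company Name": ("company_name", 0), "company_name": ("company_name", 1),
--     "company": ("company_name", 2), "current_company": ("company_name", 3),
--     "Company Domain": ("domain", 0), "company_domain": ("domain", 1),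
--     "domain": ("domain", 2), "company_website": ("domain", 3),
--     "LinkedIn URL": ("linkedin_url", 0), "linkedin_url": ("linkedin_url", 1),
--     "linkedin_profile_url": ("linkedin_url", 2), "profileUrl": ("linkedin_url", 3),
--     "Location": ("country", 0), "country": ("country", 1), "location": ("country", 2),
--     "Email": ("email", 0), "email": ("email", 1), "found_email": ("email", 2),
--     "Phone": ("phone", 0), "phone": ("phone", 1), "phone_number": ("phone", 2),
-- }
--
-- _DEFAULTS = [
--     ("first_name", ""), ("last_name", ""), ("full_name", None), ("job_title", ""),
--     ("company_name", ""), ("domain", ""), ("linkedin_url", ""), ("country", ""),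
--     ("email", None), ("phone", None),
-- ]
--
--
-- def parse_prospects(prospects: list) -> list:
--     contacts = []
--     for p in prospects:
--         best = {}
--         for k, v in p.items():
--             hit = _SOURCES.get(k)
--             if hit and v:
--                 field, rank = hit
--                 cur = best.get(field)
--                 if cur is None or rank < cur[0]:
--                     best[field] = (rank, v)
--         c = {field: (best[field][1] if field in best else default)
--              for field, default in _DEFAULTS}
--         if c["full_name"] is None:
--             c["full_name"] = f"{c['first_name']} {c['last_name']}".strip()
--         if c["full_name"] or c["job_title"]:
--             contacts.append(c)
--     return contacts
-- ===== Notes on version B (the rewrite author's own statement) =====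
-- stated objective: alternative
-- what changed: Inverts the traversal: instead of probing each output field through an or-chain of p.get calls, B builds a reverse index source-key -> (field, rank) and makes one pass over each prospect's items keeping per field the truthy value of minimal rank, then fills defaults, patches full_name and filters.
import Mathlib
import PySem

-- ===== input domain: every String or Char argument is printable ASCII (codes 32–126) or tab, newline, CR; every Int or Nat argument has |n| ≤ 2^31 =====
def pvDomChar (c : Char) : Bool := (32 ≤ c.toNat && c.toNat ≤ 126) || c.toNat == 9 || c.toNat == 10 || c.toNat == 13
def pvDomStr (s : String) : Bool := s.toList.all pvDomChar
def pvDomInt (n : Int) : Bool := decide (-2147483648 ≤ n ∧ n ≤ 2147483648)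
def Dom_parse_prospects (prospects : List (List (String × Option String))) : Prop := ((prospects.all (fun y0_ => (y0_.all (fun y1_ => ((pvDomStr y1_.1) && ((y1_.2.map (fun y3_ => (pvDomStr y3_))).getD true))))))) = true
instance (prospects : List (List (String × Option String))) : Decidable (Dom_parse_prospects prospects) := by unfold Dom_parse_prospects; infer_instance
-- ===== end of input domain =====

-- B inverts the traversal: a reverse index source-key -> (field, rank) and one pass over each
-- prospect's items keeping per field the truthy value of minimal rank (objective: alternative).

-- ===== PORT A =====
-- p.get(k): first match in the association list; a missing key and a stored None
-- both come out as `none`, exactly Python's falsy result of dict.get.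
def pvGet : List (String × Option String) → String → Option String
  | [], _ => none
  | (k', v) :: rest, k => if k' == k then v else pvGet rest k

-- Python truthiness of an Optional[str] value: neither None nor "".
def pvTruthy : Option String → Bool
  | some s => !(s == "")
  | none => false

-- `a or b` on Optional[str] values (short-circuit, left to right).
def pvOr (a b : Option String) : Option String := if pvTruthy a then a else b

-- `a or "…"` : an `or`-chain whose last alternative is a plain string.
def pvOrS (a : Option String) (d : String) : String := if pvTruthy a then a.getD d else d

def parse_prospects (prospects : List (List (String × Option String))) : List (List (String × Option String)) :=
  prospects.foldl (fun contacts p =>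
    let fn := pvOrS (pvOr (pvGet p "First Name") (pvOr (pvGet p "first_name") (pvGet p "firstName"))) ""
    let ln := pvOrS (pvOr (pvGet p "Last Name") (pvOr (pvGet p "last_name") (pvGet p "lastName"))) ""
    let full := pvOrS (pvOr (pvGet p "Full Name") (pvOr (pvGet p "full_name")
                  (pvOr (pvGet p "fullName") (pvGet p "name"))))
                  (PySem.Str.strip (fn ++ " " ++ ln))
    let c : List (String × Option String) :=
      [("first_name", some fn),
       ("last_name", some ln),
       ("full_name", some full),
       ("job_title", some (pvOrS (pvOr (pvGet p "Current Job") (pvOr (pvGet p "job_title")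
                       (pvOr (pvGet p "headline") (pvOr (pvGet p "title") (pvGet p "current_title"))))) "")),
       ("company_name", some (pvOrS (pvOr (pvGet p "Company Name") (pvOr (pvGet p "company_name")
                       (pvOr (pvGet p "company") (pvGet p "current_company")))) "")),
       ("domain", some (pvOrS (pvOr (pvGet p "Company Domain") (pvOr (pvGet p "company_domain")
                       (pvOr (pvGet p "domain") (pvGet p "company_website")))) "")),
       ("linkedin_url", some (pvOrS (pvOr (pvGet p "LinkedIn URL") (pvOr (pvGet p "linkedin_url")
                       (pvOr (pvGet p "linkedin_profile_url") (pvGet p "profileUrl")))) "")),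
       ("country", some (pvOrS (pvOr (pvGet p "Location") (pvOr (pvGet p "country") (pvGet p "location"))) "")),
       ("email", pvOr (pvGet p "Email") (pvOr (pvGet p "email") (pvOr (pvGet p "found_email") none))),
       ("phone", pvOr (pvGet p "Phone") (pvOr (pvGet p "phone") (pvOr (pvGet p "phone_number") none)))]
    -- if c["full_name"] or c["job_title"]
    if pvTruthy (pvGet c "full_name") || pvTruthy (pvGet c "job_title") then
      contacts ++ [c]
    else contacts) []

-- ===== PORT B =====
-- _SOURCES of Source B: reverse index source key -> (output field, rank in that field's chain)
def pvSources : List (String × String × Nat) :=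
  [("First Name", "first_name", 0), ("first_name", "first_name", 1), ("firstName", "first_name", 2),
   ("Last Name", "last_name", 0), ("last_name", "last_name", 1), ("lastName", "last_name", 2),
   ("Full Name", "full_name", 0), ("full_name", "full_name", 1), ("fullName", "full_name", 2), ("name", "full_name", 3),
   ("Current Job", "job_title", 0), ("job_title", "job_title", 1), ("headline", "job_title", 2),
   ("title", "job_title", 3), ("current_title", "job_title", 4),
   ("Company Name", "company_name", 0), ("company_name", "company_name", 1),
   ("company", "company_name", 2), ("current_company", "company_name", 3),
   ("Company Domain", "domain", 0), ("company_domain", "domain", 1),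
   ("domain", "domain", 2), ("company_website", "domain", 3),
   ("LinkedIn URL", "linkedin_url", 0), ("linkedin_url", "linkedin_url", 1),
   ("linkedin_profile_url", "linkedin_url", 2), ("profileUrl", "linkedin_url", 3),
   ("Location", "country", 0), ("country", "country", 1), ("location", "country", 2),
   ("Email", "email", 0), ("email", "email", 1), ("found_email", "email", 2),
   ("Phone", "phone", 0), ("phone", "phone", 1), ("phone_number", "phone", 2)]

-- _SOURCES.get(k)
def srcLookup (k : String) : Option (String × Nat) := List.lookup k pvSources

-- _DEFAULTS of Source B: output fields in order with their default values
def pvDefaults : List (String × Option String) :=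
  [("first_name", some ""), ("last_name", some ""), ("full_name", none), ("job_title", some ""),
   ("company_name", some ""), ("domain", some ""), ("linkedin_url", some ""), ("country", some ""),
   ("email", none), ("phone", none)]

-- best.get(field) on the best-so-far dict field -> (rank, value)
def bLookup : List (String × Nat × String) → String → Option (Nat × String)
  | [], _ => none
  | (f', rv) :: rest, f => if f' == f then some rv else bLookup rest f

-- best[field] = rv : overwrite in place keeping the key's position, else append
def bInsert : List (String × Nat × String) → String → Nat × String → List (String × Nat × String)
  | [], f, rv => [(f, rv)]
  | (f', rv') :: rest, f, rv => if f' == f then (f', rv) :: rest else (f', rv') :: bInsert rest f rv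

-- the body of B's inner `for k, v in p.items()` loop
def bStep (best : List (String × Nat × String)) (kv : String × Option String) : List (String × Nat × String) :=
  match srcLookup kv.1, kv.2 with
  | some fr, some s =>
    if s == "" then best
    else
      match bLookup best fr.1 with
      | none => bInsert best fr.1 (fr.2, s)
      | some cur => if fr.2 < cur.1 then bInsert best fr.1 (fr.2, s) else best
  | _, _ => best

-- c[k] = v on a dict: overwrite in place keeping the key's position
def pvSet : List (String × Option String) → String → Option String → List (String × Option String)
  | [], k, v => [(k, v)]
  | (k', v') :: rest, k, v => if k' == k then (k', v) :: rest else (k', v') :: pvSet rest k v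

-- `best[field][1] if field in best else default`
def bValue (best : List (String × Nat × String)) (f : String) (d : Option String) : Option String :=
  match bLookup best f with
  | some rv => some rv.2
  | none => d

def parse_prospects_alt (prospects : List (List (String × Option String))) : List (List (String × Option String)) :=
  prospects.foldl (fun contacts p =>
    let best := p.foldl bStep []
    let c := pvDefaults.map (fun fd => (fd.1, bValue best fd.1 fd.2))
    -- if c["full_name"] is None: c["full_name"] = f'{c["first_name"]} {c["last_name"]}'.strip()
    let c := if pvGet c "full_name" == none then
        pvSet c "full_name"
          (some (PySem.Str.strip ((pvGet c "first_name").getD "" ++ " " ++ (pvGet c "last_name").getD "")))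
      else c
    if pvTruthy (pvGet c "full_name") || pvTruthy (pvGet c "job_title") then
      contacts ++ [c]
    else contacts) []

-- ===== PRECONDITION & SPEC =====
-- Pre_ excludes association lists whose prospect has two entries with the same key: such a
-- list does not represent a Python dict (parse_prospects's actual input), so neither
-- behaviour there corresponds to the Python program.
def Pre_parse_prospects (prospects : List (List (String × Option String))) : Prop :=
  ∀ p ∈ prospects, (p.map Prod.fst).Nodup
instance (prospects : List (List (String × Option String))) : Decidable (Pre_parse_prospects prospects) := by unfold Pre_parse_prospects; infer_instance

def pvWitness_parse_prospects : (List (List (String × Option String))) :=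
  [[("First Name", some "Ada"), ("Last Name", some "Lovelace")]]

def Spec_parse_prospects (prospects : List (List (String × Option String))) (out : List (List (String × Option String))) : Prop := out = parse_prospects_alt prospects
instance (prospects : List (List (String × Option String))) (out : List (List (String × Option String))) : Decidable (Spec_parse_prospects prospects out) := by unfold Spec_parse_prospects; infer_instance

-- ===== CLAIM (what is proved, stated in full; the proofs are below) =====
def Claim_equal_parse_prospects : Prop := ∀ (prospects : List (List (String × Option String))), Dom_parse_prospects prospects → Pre_parse_prospects prospects → Spec_parse_prospects prospects (parse_prospects prospects)

-- ===== LEMMAS AND PROOFS =====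

-- the candidate key chain of each output field, in A's probing order
def keyChains (f : String) : List String :=
  if f == "first_name" then ["First Name", "first_name", "firstName"]
  else if f == "last_name" then ["Last Name", "last_name", "lastName"]
  else if f == "full_name" then ["Full Name", "full_name", "fullName", "name"]
  else if f == "job_title" then ["Current Job", "job_title", "headline", "title", "current_title"]
  else if f == "company_name" then ["Company Name", "company_name", "company", "current_company"]
  else if f == "domain" then ["Company Domain", "company_domain", "domain", "company_website"]
  else if f == "linkedin_url" then ["LinkedIn URL", "linkedin_url", "linkedin_profile_url", "profileUrl"]
  else if f == "country" then ["Location", "country", "location"]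
  else if f == "email" then ["Email", "email", "found_email"]
  else if f == "phone" then ["Phone", "phone", "phone_number"]
  else []

-- the truthy value stored at key k, if any
def tval (p : List (String × Option String)) (k : String) : Option String :=
  if pvTruthy (pvGet p k) then pvGet p k else none

-- A's or-chain over a key list, tail None
def firstTruthy (p : List (String × Option String)) : List String → Option String
  | [] => none
  | k :: ks => pvOr (pvGet p k) (firstTruthy p ks)

-- the (rank, value) candidates of a key chain, in chain order, ranks from n
def candsFrom (p : List (String × Option String)) : Nat → List String → List (Nat × String)
  | _, [] => []
  | n, k :: ks =>
    match tval p k with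
    | some s => (n, s) :: candsFrom p (n+1) ks
    | none => candsFrom p (n+1) ks

-- the (rank, value) candidates of field f found scanning p, in p order
def pvCands (f : String) (p : List (String × Option String)) : List (Nat × String) :=
  p.filterMap (fun kv =>
    match srcLookup kv.1, kv.2 with
    | some fr, some s => if s == "" then none else if fr.1 == f then some (fr.2, s) else none
    | _, _ => none)

-- keep the candidate of minimal rank, earlier wins ties
def pvMerge (acc : Option (Nat × String)) (x : Nat × String) : Option (Nat × String) :=
  match acc with
  | none => some x
  | some m => if x.1 < m.1 then some x else some m

theorem bLookup_bInsert (b : List (String × Nat × String)) (f f' : String) (rv : Nat × String) :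
    bLookup (bInsert b f rv) f' = if f == f' then some rv else bLookup b f' := by
  induction b with
  | nil => simp [bInsert, bLookup]
  | cons hd tl ih =>
    obtain ⟨g, rv'⟩ := hd
    by_cases h2 : g = f'
    · subst h2
      by_cases h : g = f
      · subst h; simp [bInsert, bLookup]
      · simp [bInsert, bLookup, h, Ne.symm h]
    · by_cases h : g = f
      · subst h; simp [bInsert, bLookup, h2]
      · simp [bInsert, bLookup, h, h2, ih]

theorem bStep_lookup (B : List (String × Nat × String)) (k : String) (v : Option String) (f : String) :
    bLookup (bStep B (k, v)) f =
      match (match srcLookup k, v with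
             | some fr, some s => if s == "" then none else if fr.1 == f then some ((fr.2 : Nat), s) else none
             | _, _ => none) with
      | some c => pvMerge (bLookup B f) c
      | none => bLookup B f := by
  cases hsrc : srcLookup k with
  | none =>
    unfold bStep
    simp only [hsrc]
  | some fr =>
    cases v with
    | none => unfold bStep; simp only [hsrc]
    | some s =>
      unfold bStep
      simp only [hsrc]
      by_cases hs : s = ""
      · rw [if_pos (show (s == "") = true by simpa using hs),
            if_pos (show (s == "") = true by simpa using hs)]
      · rw [if_neg (show ¬ (s == "") = true by simpa using hs),
            if_neg (show ¬ (s == "") = true by simpa using hs)]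
        by_cases hf : fr.1 = f
        · rw [if_pos (show (fr.1 == f) = true by simpa using hf), hf]
          cases hb : bLookup B f with
          | none => simp [bLookup_bInsert, pvMerge]
          | some cur =>
            by_cases hlt : fr.2 < cur.1
            · simp [bLookup_bInsert, pvMerge, hlt]
            · simp [pvMerge, hlt, hb]
        · rw [if_neg (show ¬ (fr.1 == f) = true by simpa using hf)]
          cases hb : bLookup B fr.1 with
          | none => simp [bLookup_bInsert, hf]
          | some cur =>
            by_cases hlt : fr.2 < cur.1
            · simp [bLookup_bInsert, hf, hlt]
            · simp [hlt]

theorem scan_lookup (p : List (String × Option String)) :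
    ∀ (B : List (String × Nat × String)) (f : String),
      bLookup (p.foldl bStep B) f = (pvCands f p).foldl pvMerge (bLookup B f) := by
  induction p with
  | nil => intro B f; rfl
  | cons kv p ih =>
    obtain ⟨k, v⟩ := kv
    intro B f
    simp only [List.foldl_cons]
    rw [ih, bStep_lookup B k v f]
    unfold pvCands
    rw [List.filterMap_cons]
    cases hsrc : srcLookup k with
    | none => cases v <;> simp
    | some fr =>
      cases v with
      | none => simp
      | some s =>
        by_cases hs : s = ""
        · simp [hs]
        · by_cases hf : fr.1 = f
          · simp [hs, hf, List.foldl_cons]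
          · simp [hs, hf]

theorem mergeFold_ne_none (cs : List (Nat × String)) :
    ∀ acc, (acc ≠ none ∨ cs ≠ []) → cs.foldl pvMerge acc ≠ none := by
  induction cs with
  | nil => intro acc h; simpa using h
  | cons x cs ih =>
    intro acc _
    refine ih _ (Or.inl ?_)
    unfold pvMerge
    cases acc with
    | none => simp
    | some m => by_cases h : x.1 < m.1 <;> simp [h]

theorem pvMerge_ne_none (acc : Option (Nat × String)) (y : Nat × String) : pvMerge acc y ≠ none := by
  cases acc with
  | none => simp [pvMerge]
  | some a => unfold pvMerge; by_cases h : y.1 < a.1 <;> simp [h]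

theorem pvMerge_cases (acc : Option (Nat × String)) (y m : Nat × String) (h : pvMerge acc y = some m) :
    (acc = some m ∨ m = y) ∧ (∀ x, acc = some x → m.1 ≤ x.1) ∧ m.1 ≤ y.1 := by
  cases acc with
  | none =>
    unfold pvMerge at h
    injection h with h
    subst h
    refine ⟨Or.inr rfl, ?_, le_refl _⟩
    intro x hx
    simp at hx
  | some a =>
    unfold pvMerge at h
    by_cases hlt : y.1 < a.1
    · simp only [hlt, if_true] at h
      injection h with h
      subst h
      refine ⟨Or.inr rfl, ?_, le_refl _⟩
      rintro x hx
      injection hx with hx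
      subst hx
      omega
    · simp only [hlt, if_false] at h
      injection h with h
      subst h
      refine ⟨Or.inl rfl, ?_, by omega⟩
      rintro x hx
      injection hx with hx
      subst hx
      exact le_refl _

theorem mergeFold_min (cs : List (Nat × String)) :
    ∀ acc m, cs.foldl pvMerge acc = some m →
      ((acc = some m ∨ m ∈ cs) ∧ (∀ x, acc = some x → m.1 ≤ x.1) ∧ (∀ x ∈ cs, m.1 ≤ x.1)) := by
  induction cs with
  | nil =>
    intro acc m h
    simp only [List.foldl_nil] at h
    refine ⟨Or.inl h, ?_, by simp⟩
    intro x hx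
    rw [h] at hx
    injection hx with hx
    subst hx
    exact le_refl _
  | cons y cs ih =>
    intro acc m h
    simp only [List.foldl_cons] at h
    cases hw : pvMerge acc y with
    | none => exact absurd hw (pvMerge_ne_none acc y)
    | some w =>
      rw [hw] at h
      obtain ⟨hmem, hacc, hcs⟩ := ih _ _ h
      have hwprops := pvMerge_cases acc y w hw
      have hm_le_w : m.1 ≤ w.1 := hacc w rfl
      refine ⟨?_, ?_, ?_⟩
      · rcases hmem with hmem | hmem
        · injection hmem with hmem
          subst hmem
          rcases hwprops.1 with h1 | h1
          · exact Or.inl h1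
          · exact Or.inr (by simp [h1])
        · exact Or.inr (List.mem_cons_of_mem _ hmem)
      · intro x hx
        exact le_trans hm_le_w (hwprops.2.1 x hx)
      · intro x hx
        rcases List.mem_cons.mp hx with hx | hx
        · subst hx
          exact le_trans hm_le_w hwprops.2.2
        · exact hcs x hx

theorem candsFrom_lb (p : List (String × Option String)) (ks : List String) :
    ∀ n x, x ∈ candsFrom p n ks → n ≤ x.1 := by
  induction ks with
  | nil => intro n x h; simp [candsFrom] at h
  | cons k ks ih =>
    intro n x h
    unfold candsFrom at h
    cases htv : tval p k with
    | some s =>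
      rw [htv] at h
      rcases List.mem_cons.mp h with h | h
      · simp [h]
      · exact le_trans (by omega) (ih (n+1) x h)
    | none =>
      rw [htv] at h
      exact le_trans (by omega) (ih (n+1) x h)

theorem tval_some (p : List (String × Option String)) (k : String) (s : String)
    (h : tval p k = some s) : pvGet p k = some s ∧ pvTruthy (pvGet p k) = true ∧ s ≠ "" := by
  unfold tval at h
  by_cases ht : pvTruthy (pvGet p k) = true
  · simp only [ht, if_true] at h
    refine ⟨h, ht, ?_⟩
    rw [h] at ht
    simpa [pvTruthy] using ht
  · simp [ht] at h

theorem tval_none (p : List (String × Option String)) (k : String)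
    (h : tval p k = none) : pvTruthy (pvGet p k) = false := by
  unfold tval at h
  by_cases ht : pvTruthy (pvGet p k) = true
  · simp only [ht, if_true] at h
    rw [h] at ht
    simp [pvTruthy] at ht
  · simpa using ht

theorem ft_candsFrom (p : List (String × Option String)) (ks : List String) :
    ∀ n, (candsFrom p n ks = [] ∧ firstTruthy p ks = none) ∨
      (∃ m rest, candsFrom p n ks = m :: rest ∧ firstTruthy p ks = some m.2 ∧ m.2 ≠ "" ∧
        ∀ x ∈ candsFrom p n ks, m.1 ≤ x.1) := by
  induction ks with
  | nil => intro n; exact Or.inl ⟨rfl, rfl⟩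
  | cons k ks ih =>
    intro n
    cases htv : tval p k with
    | some s =>
      obtain ⟨hg, ht, hs⟩ := tval_some p k s htv
      refine Or.inr ⟨(n, s), candsFrom p (n+1) ks, ?_, ?_, hs, ?_⟩
      · simp [candsFrom, htv]
      · simp [firstTruthy, pvOr, hg, pvTruthy, hs]
      · intro x hx
        simp only [candsFrom, htv] at hx
        rcases List.mem_cons.mp hx with hx | hx
        · simp [hx]
        · exact le_trans (by omega) (candsFrom_lb p ks (n+1) x hx)
    | none =>
      have ht := tval_none p k htv
      have hft : firstTruthy p (k :: ks) = firstTruthy p ks := by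
        simp [firstTruthy, pvOr, ht]
      have hc : candsFrom p n (k :: ks) = candsFrom p (n+1) ks := by simp [candsFrom, htv]
      rcases ih (n+1) with ⟨h1, h2⟩ | ⟨m, rest, h1, h2, h3, h4⟩
      · exact Or.inl ⟨by rw [hc, h1], by rw [hft, h2]⟩
      · exact Or.inr ⟨m, rest, by rw [hc, h1], by rw [hft, h2], h3, by rw [hc]; exact h4⟩

theorem mem_candsFrom (p : List (String × Option String)) (ks : List String) :
    ∀ n r s, ((r, s) ∈ candsFrom p n ks ↔ ∃ i k, ks[i]? = some k ∧ r = n + i ∧ tval p k = some s) := by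
  induction ks with
  | nil => intro n r s; simp [candsFrom]
  | cons k ks ih =>
    intro n r s
    constructor
    · intro h
      unfold candsFrom at h
      cases htv : tval p k with
      | some t =>
        rw [htv] at h
        rcases List.mem_cons.mp h with h | h
        · have h12 : r = n ∧ s = t := by simpa using h
          exact ⟨0, k, by simp, by omega, by rw [htv, h12.2]⟩
        · obtain ⟨i, k', hk, hr, ht⟩ := (ih (n+1) r s).mp h
          exact ⟨i + 1, k', by simpa using hk, by omega, ht⟩
      | none =>
        rw [htv] at h
        obtain ⟨i, k', hk, hr, ht⟩ := (ih (n+1) r s).mp h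
        exact ⟨i + 1, k', by simpa using hk, by omega, ht⟩
    · rintro ⟨i, k', hk, hr, ht⟩
      cases i with
      | zero =>
        simp only [List.getElem?_cons_zero, Option.some.injEq] at hk
        subst hk
        subst hr
        unfold candsFrom
        rw [ht]
        simp
      | succ j =>
        have hmem : (r, s) ∈ candsFrom p (n+1) ks :=
          (ih (n+1) r s).mpr ⟨j, k', by simpa using hk, by omega, ht⟩
        unfold candsFrom
        cases htv : tval p k with
        | some t => exact List.mem_cons_of_mem _ hmem
        | none => exact hmem

theorem mem_nodup_pvGet (p : List (String × Option String)) (k : String) (v : Option String)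
    (hnd : (p.map Prod.fst).Nodup) (h : (k, v) ∈ p) : pvGet p k = v := by
  induction p with
  | nil => simp at h
  | cons hd tl ih =>
    obtain ⟨k', v'⟩ := hd
    simp only [List.map_cons, List.nodup_cons] at hnd
    rcases List.mem_cons.mp h with h | h
    · obtain ⟨h1, h2⟩ := Prod.mk.injEq .. ▸ h
      simp [pvGet, h1.symm, h2.symm]
    · have hne : k' ≠ k := by
        intro he; subst he
        exact hnd.1 (by simpa using List.mem_map_of_mem (f := Prod.fst) h)
      simp [pvGet, hne, ih hnd.2 h]

theorem pvGet_some_mem (p : List (String × Option String)) (k : String) (s : String)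
    (h : pvGet p k = some s) : (k, some s) ∈ p := by
  induction p with
  | nil => simp [pvGet] at h
  | cons hd tl ih =>
    obtain ⟨k', v'⟩ := hd
    by_cases he : k' = k
    · subst he
      simp [pvGet] at h
      simp [h]
    · simp [pvGet, he] at h
      exact List.mem_cons_of_mem _ (ih h)

theorem src_to_chain : ∀ (k f : String) (r : Nat), srcLookup k = some (f, r) → (keyChains f)[r]? = some k := by
  intro k f r h
  unfold srcLookup pvSources at h
  simp only [List.lookup] at h
  repeat' split at h
  all_goals first
    | (injection h with h
       injection h with h1 h2
       subst h1
       subst h2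
       simp_all [keyChains])
    | exact absurd h (by simp)

set_option maxHeartbeats 1000000 in
theorem chain_to_src : ∀ (f : String) (r : Nat) (k : String), (keyChains f)[r]? = some k → srcLookup k = some (f, r) := by
  intro f r k h
  unfold keyChains at h
  split_ifs at h with c1 c2 c3 c4 c5 c6 c7 c8 c9 c10
  all_goals try (exact absurd h (by simp))
  all_goals simp only [beq_iff_eq] at *
  all_goals subst f
  all_goals rcases r with _|_|_|_|_|r <;>
    simp only [List.getElem?_cons_zero, List.getElem?_cons_succ, List.getElem?_nil] at h
  all_goals first
    | (injection h with h
       subst h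
       decide)
    | exact absurd h (by simp)

theorem mem_pvCands_iff (f : String) (p : List (String × Option String))
    (hnd : (p.map Prod.fst).Nodup) (r : Nat) (s : String) :
    ((r, s) ∈ pvCands f p ↔ (r, s) ∈ candsFrom p 0 (keyChains f)) := by
  rw [mem_candsFrom]
  constructor
  · intro h
    simp only [pvCands, List.mem_filterMap] at h
    obtain ⟨⟨k, v⟩, hmem, hg⟩ := h
    cases hsrc : srcLookup k with
    | none => rw [hsrc] at hg; simp at hg
    | some fr =>
      obtain ⟨f0, r0⟩ := fr
      rw [hsrc] at hg
      cases v with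
      | none => simp at hg
      | some t =>
        simp only [] at hg
        by_cases hts : t = ""
        · rw [if_pos (by simpa using hts)] at hg; simp at hg
        · rw [if_neg (by simpa using hts)] at hg
          by_cases hf : f0 = f
          · rw [if_pos (by simpa using hf)] at hg
            have h12 : r0 = r ∧ t = s := by simpa using hg
            obtain ⟨hr0, hts'⟩ := h12
            refine ⟨r, k, ?_, by omega, ?_⟩
            · exact src_to_chain k f r (by rw [hsrc, hf, hr0])
            · have hk' : pvGet p k = some s := by
                rw [mem_nodup_pvGet p k (some t) hnd hmem, hts']
              have hs : s ≠ "" := hts' ▸ hts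
              unfold tval
              rw [hk']
              simp [pvTruthy, hs]
          · rw [if_neg (by simpa using hf)] at hg; simp at hg
  · rintro ⟨i, k, hk, hr, ht⟩
    obtain ⟨hg, _, hs⟩ := tval_some p k s ht
    have hsrc := chain_to_src f i k hk
    simp only [pvCands, List.mem_filterMap]
    refine ⟨(k, some s), pvGet_some_mem p k s hg, ?_⟩
    rw [hsrc]
    simp only []
    rw [if_neg (by simpa using hs), if_pos (by simp), hr]
    simp

theorem candsFrom_rank_fun (p : List (String × Option String)) (ks : List String)
    (r : Nat) (s1 s2 : String)
    (h1 : (r, s1) ∈ candsFrom p 0 ks) (h2 : (r, s2) ∈ candsFrom p 0 ks) : s1 = s2 := by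
  obtain ⟨i1, k1, hk1, hr1, ht1⟩ := (mem_candsFrom p ks 0 r s1).mp h1
  obtain ⟨i2, k2, hk2, hr2, ht2⟩ := (mem_candsFrom p ks 0 r s2).mp h2
  have hii : i1 = i2 := by omega
  subst hii
  rw [hk1] at hk2
  injection hk2 with hk2
  subst hk2
  exact Option.some.inj (ht1.symm.trans ht2)

-- MASTER: B's per-field result equals A's or-chain with default d
theorem bValue_eq (p : List (String × Option String)) (hnd : (p.map Prod.fst).Nodup)
    (f : String) (d : Option String) :
    bValue (p.foldl bStep []) f d = pvOr (firstTruthy p (keyChains f)) d := by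
  unfold bValue
  rw [scan_lookup p [] f]
  have hbase : bLookup [] f = none := rfl
  rw [hbase]
  rcases ft_candsFrom p (keyChains f) 0 with ⟨h1, h2⟩ | ⟨m, rest, h1, h2, h3, h4⟩
  · have hcs : pvCands f p = [] := by
      rw [List.eq_nil_iff_forall_not_mem]
      rintro ⟨r, s⟩ hx
      rw [mem_pvCands_iff f p hnd] at hx
      rw [h1] at hx
      simp at hx
    rw [hcs, h2]
    simp [pvOr, pvTruthy]
  · have hmC : m ∈ candsFrom p 0 (keyChains f) := by
      rw [h1]; exact List.mem_cons_self ..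
    have hmemB : m ∈ pvCands f p := by
      rcases m with ⟨r0, s0⟩
      exact (mem_pvCands_iff f p hnd r0 s0).mpr hmC
    cases hres : (pvCands f p).foldl pvMerge none with
    | none =>
      exact absurd hres (mergeFold_ne_none _ _ (Or.inr (List.ne_nil_of_mem hmemB)))
    | some m' =>
      obtain ⟨hmem', _, hmin'⟩ := mergeFold_min _ _ _ hres
      have hmem'C : m' ∈ candsFrom p 0 (keyChains f) := by
        obtain ⟨r, s⟩ := m'
        rcases hmem' with h | h
        · simp at h
        · exact (mem_pvCands_iff f p hnd r s).mp h
      have hle1 : m.1 ≤ m'.1 := h4 m' hmem'C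
      have hle2 : m'.1 ≤ m.1 := hmin' m hmemB
      have hrk : m'.1 = m.1 := le_antisymm hle2 hle1
      have hval : m'.2 = m.2 :=
        candsFrom_rank_fun p (keyChains f) m.1 m'.2 m.2
          (by rw [← hrk]; simpa using hmem'C) (by simpa using hmC)
      rw [h2]
      simp only []
      rw [hval]
      have ht : pvTruthy (some m.2) = true := by simp [pvTruthy, h3]
      simp [pvOr, ht]

-- truthiness-equivalence: same truth value, and equal when truthy
def TEq (x y : Option String) : Prop := pvTruthy x = pvTruthy y ∧ (pvTruthy x = true → x = y)

theorem TEq_or_none (c : Option String) : TEq (pvOr c none) c := by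
  unfold TEq
  refine ⟨?_, ?_⟩
  · unfold pvOr
    by_cases h : pvTruthy c = true
    · rw [if_pos h]
    · rw [if_neg h]
      have hc : pvTruthy c = false := by simpa using h
      rw [hc]
      rfl
  · intro h
    unfold pvOr at h ⊢
    by_cases hc : pvTruthy c = true
    · rw [if_pos hc]
    · rw [if_neg hc] at h
      simp [pvTruthy] at h

theorem TEq_cons (a : Option String) {x y : Option String} (h : TEq x y) : TEq (pvOr a x) (pvOr a y) := by
  obtain ⟨h1, h2⟩ := h
  unfold TEq pvOr
  by_cases ha : pvTruthy a = true
  · simp [ha]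
  · simp only [ha]
    exact ⟨h1, h2⟩

theorem pvOr_congr {x y : Option String} (z : Option String) (h : TEq x y) : pvOr x z = pvOr y z := by
  unfold TEq at h
  unfold pvOr
  rw [h.1]
  by_cases hy : pvTruthy y = true
  · simp [hy, h.2 (h.1 ▸ hy)]
  · simp [hy]

theorem some_pvOrS (a : Option String) (d : String) :
    some (pvOrS a d) = pvOr a (some d) := by
  cases a with
  | none => simp [pvOrS, pvOr, pvTruthy]
  | some s => by_cases h : s = "" <;> simp [pvOrS, pvOr, pvTruthy, h]

theorem ft_none_or_truthy (p : List (String × Option String)) (ks : List String) :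
    firstTruthy p ks = none ∨ pvTruthy (firstTruthy p ks) = true := by
  induction ks with
  | nil => exact Or.inl rfl
  | cons k ks ih =>
    by_cases h : pvTruthy (pvGet p k) = true
    · exact Or.inr (by simp [firstTruthy, pvOr, h])
    · simpa [firstTruthy, pvOr, h] using ih

theorem pvOr_ft_none (p : List (String × Option String)) (ks : List String) :
    pvOr (firstTruthy p ks) none = firstTruthy p ks := by
  rcases ft_none_or_truthy p ks with h | h
  · simp [h, pvOr, pvTruthy]
  · simp [pvOr, h]

theorem ft_def3 (p : List (String × Option String)) (k1 k2 k3 : String) :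
    firstTruthy p [k1, k2, k3] = pvOr (pvGet p k1) (pvOr (pvGet p k2) (pvOr (pvGet p k3) none)) := rfl

theorem ft_def4 (p : List (String × Option String)) (k1 k2 k3 k4 : String) :
    firstTruthy p [k1, k2, k3, k4]
      = pvOr (pvGet p k1) (pvOr (pvGet p k2) (pvOr (pvGet p k3) (pvOr (pvGet p k4) none))) := rfl

theorem ft_def5 (p : List (String × Option String)) (k1 k2 k3 k4 k5 : String) :
    firstTruthy p [k1, k2, k3, k4, k5]
      = pvOr (pvGet p k1) (pvOr (pvGet p k2) (pvOr (pvGet p k3) (pvOr (pvGet p k4) (pvOr (pvGet p k5) none)))) := rfl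

theorem TEq3 (p : List (String × Option String)) (k1 k2 k3 : String) :
    TEq (firstTruthy p [k1, k2, k3]) (pvOr (pvGet p k1) (pvOr (pvGet p k2) (pvGet p k3))) := by
  rw [ft_def3]
  exact TEq_cons _ (TEq_cons _ (TEq_or_none _))

theorem TEq4 (p : List (String × Option String)) (k1 k2 k3 k4 : String) :
    TEq (firstTruthy p [k1, k2, k3, k4])
      (pvOr (pvGet p k1) (pvOr (pvGet p k2) (pvOr (pvGet p k3) (pvGet p k4)))) := by
  rw [ft_def4]
  exact TEq_cons _ (TEq_cons _ (TEq_cons _ (TEq_or_none _)))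

theorem TEq5 (p : List (String × Option String)) (k1 k2 k3 k4 k5 : String) :
    TEq (firstTruthy p [k1, k2, k3, k4, k5])
      (pvOr (pvGet p k1) (pvOr (pvGet p k2) (pvOr (pvGet p k3) (pvOr (pvGet p k4) (pvGet p k5))))) := by
  rw [ft_def5]
  exact TEq_cons _ (TEq_cons _ (TEq_cons _ (TEq_cons _ (TEq_or_none _))))

theorem chainS3 (p : List (String × Option String)) (k1 k2 k3 : String) (d : String) :
    pvOr (firstTruthy p [k1, k2, k3]) (some d)
      = some (pvOrS (pvOr (pvGet p k1) (pvOr (pvGet p k2) (pvGet p k3))) d) := by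
  rw [some_pvOrS]
  exact pvOr_congr _ (TEq3 p k1 k2 k3)

theorem chainS4 (p : List (String × Option String)) (k1 k2 k3 k4 : String) (d : String) :
    pvOr (firstTruthy p [k1, k2, k3, k4]) (some d)
      = some (pvOrS (pvOr (pvGet p k1) (pvOr (pvGet p k2) (pvOr (pvGet p k3) (pvGet p k4)))) d) := by
  rw [some_pvOrS]
  exact pvOr_congr _ (TEq4 p k1 k2 k3 k4)

theorem chainS5 (p : List (String × Option String)) (k1 k2 k3 k4 k5 : String) (d : String) :
    pvOr (firstTruthy p [k1, k2, k3, k4, k5]) (some d)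
      = some (pvOrS (pvOr (pvGet p k1) (pvOr (pvGet p k2) (pvOr (pvGet p k3) (pvOr (pvGet p k4) (pvGet p k5))))) d) := by
  rw [some_pvOrS]
  exact pvOr_congr _ (TEq5 p k1 k2 k3 k4 k5)

theorem pvOrS_falsy (a : Option String) (d : String) (h : pvTruthy a = false) : pvOrS a d = d := by
  simp [pvOrS, h]

theorem ft_some_truthy (p : List (String × Option String)) (ks : List String) (s : String)
    (h : firstTruthy p ks = some s) : pvTruthy (some s) = true := by
  rcases ft_none_or_truthy p ks with h' | h'
  · rw [h] at h'; cases h'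
  · rwa [h] at h'

-- the two per-prospect bodies agree on a prospect without duplicate keys
theorem step_eq (contacts : List (List (String × Option String))) (p : List (String × Option String))
    (hnd : (p.map Prod.fst).Nodup) :
    (fun contacts p =>
    let fn := pvOrS (pvOr (pvGet p "First Name") (pvOr (pvGet p "first_name") (pvGet p "firstName"))) ""
    let ln := pvOrS (pvOr (pvGet p "Last Name") (pvOr (pvGet p "last_name") (pvGet p "lastName"))) ""
    let full := pvOrS (pvOr (pvGet p "Full Name") (pvOr (pvGet p "full_name")
                  (pvOr (pvGet p "fullName") (pvGet p "name"))))
                  (PySem.Str.strip (fn ++ " " ++ ln))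
    let c : List (String × Option String) :=
      [("first_name", some fn),
       ("last_name", some ln),
       ("full_name", some full),
       ("job_title", some (pvOrS (pvOr (pvGet p "Current Job") (pvOr (pvGet p "job_title")
                       (pvOr (pvGet p "headline") (pvOr (pvGet p "title") (pvGet p "current_title"))))) "")),
       ("company_name", some (pvOrS (pvOr (pvGet p "Company Name") (pvOr (pvGet p "company_name")
                       (pvOr (pvGet p "company") (pvGet p "current_company")))) "")),
       ("domain", some (pvOrS (pvOr (pvGet p "Company Domain") (pvOr (pvGet p "company_domain")
                       (pvOr (pvGet p "domain") (pvGet p "company_website")))) "")),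
       ("linkedin_url", some (pvOrS (pvOr (pvGet p "LinkedIn URL") (pvOr (pvGet p "linkedin_url")
                       (pvOr (pvGet p "linkedin_profile_url") (pvGet p "profileUrl")))) "")),
       ("country", some (pvOrS (pvOr (pvGet p "Location") (pvOr (pvGet p "country") (pvGet p "location"))) "")),
       ("email", pvOr (pvGet p "Email") (pvOr (pvGet p "email") (pvOr (pvGet p "found_email") none))),
       ("phone", pvOr (pvGet p "Phone") (pvOr (pvGet p "phone") (pvOr (pvGet p "phone_number") none)))]
    if pvTruthy (pvGet c "full_name") || pvTruthy (pvGet c "job_title") then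
      contacts ++ [c]
    else contacts) contacts p =
    (fun contacts p =>
    let best := p.foldl bStep []
    let c := pvDefaults.map (fun fd => (fd.1, bValue best fd.1 fd.2))
    let c := if pvGet c "full_name" == none then
        pvSet c "full_name"
          (some (PySem.Str.strip ((pvGet c "first_name").getD "" ++ " " ++ (pvGet c "last_name").getD "")))
      else c
    if pvTruthy (pvGet c "full_name") || pvTruthy (pvGet c "job_title") then
      contacts ++ [c]
    else contacts) contacts p := by
  simp only [pvDefaults, List.map_cons, List.map_nil, bValue_eq p hnd]
  simp [keyChains]
  rw [chainS3 p "First Name" "first_name" "firstName",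
      chainS3 p "Last Name" "last_name" "lastName",
      chainS5 p "Current Job" "job_title" "headline" "title" "current_title",
      chainS4 p "Company Name" "company_name" "company" "current_company",
      chainS4 p "Company Domain" "company_domain" "domain" "company_website",
      chainS4 p "LinkedIn URL" "linkedin_url" "linkedin_profile_url" "profileUrl",
      chainS3 p "Location" "country" "location",
      pvOr_ft_none p ["Full Name", "full_name", "fullName", "name"],
      pvOr_ft_none p ["Email", "email", "found_email"],
      pvOr_ft_none p ["Phone", "phone", "phone_number"],
      ft_def3 p "Email" "email" "found_email",
      ft_def3 p "Phone" "phone" "phone_number"]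
  cases hft : firstTruthy p ["Full Name", "full_name", "fullName", "name"] with
  | none =>
    have hfe : pvTruthy (pvOr (pvGet p "Full Name") (pvOr (pvGet p "full_name")
        (pvOr (pvGet p "fullName") (pvGet p "name")))) = false := by
      have h1 := (TEq4 p "Full Name" "full_name" "fullName" "name").1
      rw [hft] at h1
      simpa [pvTruthy] using h1.symm
    rw [pvOrS_falsy _ _ hfe]
    simp [pvGet, pvSet, pvTruthy]
  | some s =>
    have hs : pvTruthy (some s) = true := ft_some_truthy p _ s hft
    rw [← chainS4 p "Full Name" "full_name" "fullName" "name", hft]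
    simp [pvGet, pvOr, hs]

theorem ports_eq (prospects : List (List (String × Option String)))
    (hnd : ∀ p ∈ prospects, (p.map Prod.fst).Nodup) :
    parse_prospects prospects = parse_prospects_alt prospects := by
  unfold parse_prospects parse_prospects_alt
  induction prospects using List.reverseRecOn with
  | nil => rfl
  | append_singleton xs x ih =>
    rw [List.foldl_append, List.foldl_append,
        ih (fun p hp => hnd p (List.mem_append_left _ hp))]
    exact step_eq _ x (hnd x (by simp))

-- ===== VERDICT (by name: the statement is the Claim_ definition above) =====
theorem parse_prospects_spec : Claim_equal_parse_prospects := by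
  intro prospects _ hpre
  unfold Spec_parse_prospects
  exact ports_eq prospects hpre
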